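-- pv_equiv track=rewrite | github.com/datalater/tryhello | try04_rm_small.py | rm_small
-- ===== SOURCE A (Python) =====
-- def rm_small(my_list):
--     sort_list = list(my_list)
--     sort_list.sort()
--     for i in range(len(my_list)):
--         if my_list[i]==sort_list[0]:
--             del my_list[i]
--             break
--     return my_list
-- ===== SOURCE B (Python) =====
-- def rm_small(my_list):
--     # One-pass argmin instead of sorting a copy and rescanning; same in-place
--     # deletion of the first occurrence of the minimum, same returned object.
--     if not my_list:
--         return my_list
--     min_idx = 0
--     for i in range(1, len(my_list)):
--         if my_list[i] < my_list[min_idx]: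
--             min_idx = i
--     del my_list[min_idx]
--     return my_list
-- ===== Notes on version B (the rewrite author's own statement) =====
-- stated objective: faster
-- what changed: Replaces sort-a-copy-then-scan-for-the-first-match with a single argmin pass that tracks the index of the running minimum and deletes it.
import Mathlib
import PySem

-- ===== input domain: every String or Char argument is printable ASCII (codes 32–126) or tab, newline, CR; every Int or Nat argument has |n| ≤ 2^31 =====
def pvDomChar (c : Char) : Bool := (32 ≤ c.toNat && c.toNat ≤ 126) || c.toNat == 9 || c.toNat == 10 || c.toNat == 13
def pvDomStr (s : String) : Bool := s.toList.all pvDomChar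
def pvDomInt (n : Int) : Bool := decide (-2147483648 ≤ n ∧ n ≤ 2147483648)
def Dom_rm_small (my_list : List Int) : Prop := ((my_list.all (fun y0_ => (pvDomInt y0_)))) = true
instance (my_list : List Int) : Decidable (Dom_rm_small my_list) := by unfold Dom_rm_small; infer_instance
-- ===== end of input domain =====

-- B replaces A's sort-a-copy-then-rescan with one argmin pass (faster in a timing run);
-- both Pythons mutate my_list in place identically; the equivalence proved is about the return value.

-- ===== PORT A =====
-- the 'for i in range(len(my_list)): if my_list[i]==sort_list[0]: del my_list[i]; break'
-- loop: walk the list, drop the first element equal to m, keep the rest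
def rmFirstA (m : Int) : List Int → List Int
  | [] => []
  | x :: xs => if x == m then xs else x :: rmFirstA m xs

def rm_small (my_list : List Int) : List Int :=
  match PySem.List.sorted my_list (fun x => x) false with
  | [] => my_list              -- empty list: the loop body never runs
  | m :: _ => rmFirstA m my_list

-- ===== PORT B =====
-- the 'for i in range(1, len(my_list)): if my_list[i] < my_list[min_idx]: min_idx = i'
-- loop, carrying (min_idx, my_list[min_idx]) and the current index i
def argminB : List Int → Int → Nat → Nat → Nat × Int
  | [], mv, mi, _ => (mi, mv)
  | y :: ys, mv, mi, i => if y < mv then argminB ys y i (i + 1) else argminB ys mv mi (i + 1)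

def rm_small_alt (my_list : List Int) : List Int :=
  match my_list with
  | [] => []                   -- 'if not my_list: return my_list'
  | x :: xs => (x :: xs).eraseIdx (argminB xs x 0 1).1   -- 'del my_list[min_idx]'

-- ===== PRECONDITION & SPEC =====
def Spec_rm_small (my_list : List Int) (out : List Int) : Prop := out = rm_small_alt my_list
instance (my_list : List Int) (out : List Int) : Decidable (Spec_rm_small my_list out) := by unfold Spec_rm_small; infer_instance

-- ===== CLAIM (what is proved, stated in full; the proofs are below) =====
def Claim_equal_rm_small : Prop := ∀ (my_list : List Int), Dom_rm_small my_list → Spec_rm_small my_list (rm_small my_list)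

-- ===== LEMMAS AND PROOFS =====

theorem idxOf_append_not_mem (a : Int) (l : List Int) (h : a ∉ l) :
    (l ++ [a]).idxOf a = l.length := by
  induction l with
  | nil => simp
  | cons x xs ih =>
    have hx : ¬ (x == a) = true := by
      simp only [beq_iff_eq]
      intro he; exact h (by simp [he])
    simp [List.idxOf_cons, hx, ih (fun hm => h (List.mem_cons_of_mem _ hm))]

theorem idxOf_append_mem (a : Int) (l l' : List Int) (h : a ∈ l) :
    (l ++ l').idxOf a = l.idxOf a := by
  induction l with
  | nil => simp at h
  | cons x xs ih =>
    by_cases hx : x = a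
    · simp [hx]
    · have hm : a ∈ xs := by
        rcases List.mem_cons.1 h with h | h
        · exact absurd h.symm hx
        · exact h
      simp [hx, ih hm]

theorem rmFirstA_eq_eraseIdx (m : Int) (l : List Int) :
    l.eraseIdx (l.idxOf m) = rmFirstA m l := by
  induction l with
  | nil => simp [rmFirstA]
  | cons x xs ih =>
    by_cases hx : x = m
    · simp [rmFirstA, hx]
    · simp [rmFirstA, hx, List.eraseIdx_cons_succ, ih]

-- loop invariant for argminB: pre is the processed prefix, mv its minimum,
-- the carried index is the first index of mv in pre
theorem argminB_inv (ys : List Int) : ∀ (pre : List Int) (mv : Int),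
    mv ∈ pre → (∀ z ∈ pre, mv ≤ z) →
    (argminB ys mv (pre.idxOf mv) pre.length).2 ∈ pre ++ ys ∧
    (∀ z ∈ pre ++ ys, (argminB ys mv (pre.idxOf mv) pre.length).2 ≤ z) ∧
    (argminB ys mv (pre.idxOf mv) pre.length).1 =
      (pre ++ ys).idxOf (argminB ys mv (pre.idxOf mv) pre.length).2 := by
  induction ys with
  | nil =>
    intro pre mv hmem hmin
    simp only [argminB, List.append_nil]
    exact ⟨hmem, hmin, trivial⟩
  | cons y ys ih =>
    intro pre mv hmem hmin
    by_cases hy : y < mv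
    · have hnot : y ∉ pre := by
        intro hin
        exact absurd (hmin y hin) (by omega)
      have h1 : (pre ++ [y]).idxOf y = pre.length := idxOf_append_not_mem y pre hnot
      have h2 : y ∈ pre ++ [y] := by simp
      have h3 : ∀ z ∈ pre ++ [y], y ≤ z := by
        intro z hz
        rcases List.mem_append.1 hz with h | h
        · exact le_of_lt (lt_of_lt_of_le hy (hmin z h))
        · simp at h; omega
      have := ih (pre ++ [y]) y h2 h3
      rw [h1] at this
      simpa [argminB, hy, List.append_assoc] using this
    · have h1 : (pre ++ [y]).idxOf mv = pre.idxOf mv := idxOf_append_mem mv pre [y] hmem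
      have h2 : mv ∈ pre ++ [y] := List.mem_append.2 (Or.inl hmem)
      have h3 : ∀ z ∈ pre ++ [y], mv ≤ z := by
        intro z hz
        rcases List.mem_append.1 hz with h | h
        · exact hmin z h
        · simp at h; omega
      have := ih (pre ++ [y]) mv h2 h3
      rw [h1] at this
      simpa [argminB, hy, List.append_assoc] using this

-- ===== VERDICT (by name: the statement is the Claim_ definition above) =====
theorem rm_small_spec : Claim_equal_rm_small := by
  intro my_list _
  unfold Spec_rm_small
  match my_list with
  | [] =>
    have hs : PySem.List.sorted ([] : List Int) (fun x => x) false = [] :=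
      (PySem.List.sorted_eq_nil_iff _ _ _).2 rfl
    simp [rm_small, rm_small_alt, hs]
  | x :: xs =>
    -- A's minimum: head of the sorted copy
    rcases hsort : PySem.List.sorted (x :: xs) (fun x => x) false with _ | ⟨m, t⟩
    · exact absurd ((PySem.List.sorted_eq_nil_iff _ _ _).1 hsort) (by simp)
    · have hmmem : m ∈ x :: xs := by
        have := PySem.List.mem_sorted (x :: xs) (fun x => x) false m
        rw [hsort] at this
        exact this.1 (by simp)
      have hmmin : ∀ y ∈ x :: xs, m ≤ y :=
        PySem.List.key_head_sorted_le (x :: xs) (fun x => x) hsort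
      -- B's minimum: the argmin loop, with prefix [x]
      have hinv := argminB_inv xs [x] x (by simp) (by simp)
      simp only [List.idxOf_cons_self, List.length_cons, List.length_nil,
        List.singleton_append] at hinv
      obtain ⟨hbmem, hbmin, hbidx⟩ := hinv
      have heq : m = (argminB xs x 0 1).2 :=
        le_antisymm (hmmin _ hbmem) (hbmin m hmmem)
      calc rm_small (x :: xs) = rmFirstA m (x :: xs) := by
              simp [rm_small, hsort]
        _ = (x :: xs).eraseIdx ((x :: xs).idxOf m) := (rmFirstA_eq_eraseIdx m _).symm
        _ = (x :: xs).eraseIdx (argminB xs x 0 1).1 := by rw [heq, ← hbidx]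
        _ = rm_small_alt (x :: xs) := by simp [rm_small_alt]
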